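-- pv_equiv track=rewrite | github.com/kyucchoi/python-algorithm | level0/조건에_맞게_수열_변환하기_2/solution.py | solution
-- ===== SOURCE A (Python) =====
-- def solution(arr):
--    count = 0
--
--    while True:
--        # 현재 배열을 복사해서 저장
--        prev = arr.copy()
--
--        # 각 원소를 조건에 따라 변환
--        for i in range(len(arr)):
--            if arr[i] >= 50 and arr[i] % 2 == 0:  # 50 이상 짝수
--                arr[i] //= 2
--            elif arr[i] < 50 and arr[i] % 2 == 1:  # 50 미만 홀수
--                arr[i] = arr[i] * 2 + 1
--
--        # 이전 배열과 현재 배열이 같으면 종료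
--        if prev == arr:
--            return count
--
--        count += 1
-- ===== SOURCE B (Python) =====
-- def solution(arr):
--     # Per-element simulation: each position evolves independently, so the
--     # number of rounds until the whole array is stable is the max over
--     # elements of the per-element stabilization step count.
--     # (Unlike A, this does not mutate the caller's list.)
--     best = 0
--     for x in arr:
--         steps = 0
--         while True:
--             if x >= 50 and x % 2 == 0:
--                 y = x // 2
--             elif x < 50 and x % 2 == 1:
--                 y = x * 2 + 1
--             else:
--                 y = x
--             if y == x:
--                 break
--             x = y
--             steps += 1
--         best = max(best, steps)
--     return best
-- ===== Notes on version B (the rewrite author's own statement) =====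
-- stated objective: alternative
-- what changed: Instead of repeatedly transforming the whole array round by round until a full pass changes nothing, B simulates each element's trajectory independently once and returns the maximum per-element stabilization step count (elements evolve independently, so the round count equals that maximum); B also does not mutate the input list, unlike A.
import Mathlib
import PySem

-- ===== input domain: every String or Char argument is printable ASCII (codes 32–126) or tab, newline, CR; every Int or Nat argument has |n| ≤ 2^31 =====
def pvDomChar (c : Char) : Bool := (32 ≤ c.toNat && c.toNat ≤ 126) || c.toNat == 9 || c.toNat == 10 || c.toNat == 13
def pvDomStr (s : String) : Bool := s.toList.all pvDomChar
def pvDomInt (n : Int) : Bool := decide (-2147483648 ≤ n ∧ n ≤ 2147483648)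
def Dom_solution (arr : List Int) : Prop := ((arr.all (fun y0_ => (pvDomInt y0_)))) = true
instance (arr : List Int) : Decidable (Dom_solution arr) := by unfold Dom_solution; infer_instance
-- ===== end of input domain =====

-- B simulates each element independently and returns the max of the per-element
-- stabilization step counts (a different algorithm: one independent pass per
-- element instead of repeated whole-array rounds).  A mutates its argument in place; the equivalence proved
-- here is about the RETURN value only (B does not mutate).

-- ===== PORT A =====
-- the element-wise transform both Pythons apply (A's for-loop body / B's if-chain)
def pvStep (x : Int) : Int :=
  if 50 ≤ x ∧ PySem.Int.mod x 2 = 0 then PySem.Int.floordiv x 2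
  else if x < 50 ∧ PySem.Int.mod x 2 = 1 then x * 2 + 1
  else x

-- A's `while True` loop; each inner `for i in range(len(arr))` pass writes arr[i]
-- from the current arr[i] only, so one pass is `arr.map pvStep`.  The fuel argument
-- only makes the recursion total; on every input satisfying Pre_solution it is
-- large enough that the 0-fuel branch is never taken (proved below).
def solutionLoop : Nat → List Int → Int → Int
  | 0, _, count => count
  | f + 1, arr, count =>
    let next := arr.map pvStep
    if next = arr then count else solutionLoop f next (count + 1)

def solution (arr : List Int) : Int :=
  solutionLoop (arr.foldl (fun a x => a + x.natAbs + 51) 0 + 1) arr 0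

-- ===== PORT B =====
-- Source B's inner while loop: steps until x is a fixed point (fuel again only for totality)
def pvStepsB : Nat → Int → Nat
  | 0, _ => 0
  | f + 1, x => if pvStep x = x then 0 else pvStepsB f (pvStep x) + 1

def solution_alt (arr : List Int) : Int :=
  arr.foldl (fun best x => max best ((pvStepsB (x.natAbs + 51) x : Nat) : Int)) 0

-- ===== PRECONDITION & SPEC =====
-- Pre_ excludes exactly the inputs containing a negative odd element other than -1
-- (-1 is a fixed point of the transform): on those Python A loops forever
-- (x -> 2*x+1 stays negative and odd), returning nothing.
def Pre_solution (arr : List Int) : Prop := ∀ x ∈ arr, x % 2 = 0 ∨ 0 ≤ x ∨ x = -1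
instance (arr : List Int) : Decidable (Pre_solution arr) := by unfold Pre_solution; infer_instance
def pvWitness_solution : List Int := [2, 7, 100]

def Spec_solution (arr : List Int) (out : Int) : Prop := out = solution_alt arr
instance (arr : List Int) (out : Int) : Decidable (Spec_solution arr out) := by unfold Spec_solution; infer_instance

-- ===== CLAIM (what is proved, stated in full; the proofs are below) =====
def Claim_equal_solution : Prop := ∀ (arr : List Int), Dom_solution arr → Pre_solution arr → Spec_solution arr (solution arr)

-- ===== LEMMAS AND PROOFS =====

-- pvStep with Lean's `%` and `/` (divisor 2 is positive, so they agree with Python's)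
theorem pvStep_eq (x : Int) :
    pvStep x = if 50 ≤ x ∧ x % 2 = 0 then x / 2 else if x < 50 ∧ x % 2 = 1 then x * 2 + 1 else x := by
  unfold pvStep
  rw [PySem.Int.mod_eq_emod_of_pos (by norm_num), PySem.Int.floordiv_eq_ediv_of_pos (by norm_num)]

-- termination measure for a single element's trajectory
def pvM (x : Int) : Nat :=
  if (50 ≤ x ∧ x % 2 = 0) ∨ (x < 50 ∧ x % 2 = 1) then
    (if x < 50 then (50 - x).toNat else x.toNat) else 0

-- per-element steps with the fuel Source B's port uses
def pvN (x : Int) : Nat := pvStepsB (x.natAbs + 51) x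

theorem pvGood_step {x : Int} (h : x % 2 = 0 ∨ 0 ≤ x ∨ x = -1) :
    pvStep x % 2 = 0 ∨ 0 ≤ pvStep x ∨ pvStep x = -1 := by
  rw [pvStep_eq]; split_ifs with h1 h2 <;> omega

theorem pvM_le {x : Int} (_h : x % 2 = 0 ∨ 0 ≤ x ∨ x = -1) : pvM x ≤ x.natAbs + 50 := by
  unfold pvM; split_ifs <;> omega

theorem pvStep_fix_of_M_zero {x : Int} (_h : x % 2 = 0 ∨ 0 ≤ x ∨ x = -1) (h0 : pvM x = 0) :
    pvStep x = x := by
  rw [pvStep_eq]; unfold pvM at h0; split_ifs at h0 ⊢ <;> omega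

theorem pvDec {x : Int} (h : x % 2 = 0 ∨ 0 ≤ x ∨ x = -1) (hne : pvStep x ≠ x) :
    pvM (pvStep x) < pvM x := by
  rw [pvStep_eq] at hne ⊢; unfold pvM
  split_ifs at hne ⊢ <;> omega

theorem pvStepsB_fix {x : Int} (h : pvStep x = x) : ∀ f, pvStepsB f x = 0 := by
  intro f; cases f <;> simp [pvStepsB, h]

theorem pvStepsB_le (f : Nat) : ∀ x, pvStepsB f x ≤ f := by
  induction f with
  | zero => intro x; simp [pvStepsB]
  | succ f ih =>
    intro x; simp only [pvStepsB]
    split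
    · omega
    · have := ih (pvStep x); omega

theorem pvFuelInv : ∀ (k : Nat) (x : Int) (f f' : Nat),
    (x % 2 = 0 ∨ 0 ≤ x ∨ x = -1) → pvM x < f → pvM x < f' → pvM x ≤ k →
    pvStepsB f x = pvStepsB f' x := by
  intro k
  induction k with
  | zero =>
    intro x f f' hg hf hf' hk
    have hfix := pvStep_fix_of_M_zero hg (by omega)
    rw [pvStepsB_fix hfix, pvStepsB_fix hfix]
  | succ k ih =>
    intro x f f' hg hf hf' hk
    match f, f' with
    | f + 1, f' + 1 =>
      simp only [pvStepsB]
      split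
      · rfl
      · rename_i hne
        have hd := pvDec hg hne
        rw [ih (pvStep x) f f' (pvGood_step hg) (by omega) (by omega) (by omega)]

theorem pvN_succ {x : Int} (hg : x % 2 = 0 ∨ 0 ≤ x ∨ x = -1) (hne : pvStep x ≠ x) :
    pvN x = pvN (pvStep x) + 1 := by
  unfold pvN
  have h1 : x.natAbs + 51 = (x.natAbs + 50) + 1 := by omega
  rw [h1, show pvStepsB ((x.natAbs + 50) + 1) x
        = if pvStep x = x then 0 else pvStepsB (x.natAbs + 50) (pvStep x) + 1 from rfl,
      if_neg hne]
  have hd := pvDec hg hne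
  have hm := pvM_le hg
  have hm2 := pvM_le (pvGood_step hg)
  rw [pvFuelInv (pvM (pvStep x)) (pvStep x) (x.natAbs + 50) ((pvStep x).natAbs + 51)
      (pvGood_step hg) (by omega) (by omega) (by omega)]

theorem pvN_fix {x : Int} (h : pvStep x = x) : pvN x = 0 := pvStepsB_fix h _

-- the Nat-valued version of B's fold
def pvMax (arr : List Int) : Nat := arr.foldl (fun b x => max b (pvN x)) 0

theorem pvMax_shift : ∀ (arr : List Int) (b : Nat),
    arr.foldl (fun b x => max b (pvN x)) b = max b (pvMax arr) := by
  intro arr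
  induction arr with
  | nil => intro b; simp [pvMax]
  | cons x l ih =>
    intro b
    simp only [pvMax, List.foldl_cons] at *
    rw [ih, ih (max 0 (pvN x))]
    omega

theorem pvMax_cons (x : Int) (l : List Int) : pvMax (x :: l) = max (pvN x) (pvMax l) := by
  rw [show pvMax (x :: l)
        = l.foldl (fun b x => max b (pvN x)) (max 0 (pvN x)) from rfl, pvMax_shift]
  omega

theorem pvMax_zero : ∀ (arr : List Int), (∀ x ∈ arr, pvStep x = x) → pvMax arr = 0 := by
  intro arr
  induction arr with
  | nil => intro _; simp [pvMax]
  | cons x l ih =>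
    intro h
    rw [pvMax_cons, pvN_fix (h x (by simp)), ih (fun y hy => h y (by simp [hy]))]
    omega

theorem pvMap_fix_iff : ∀ (arr : List Int), arr.map pvStep = arr ↔ ∀ x ∈ arr, pvStep x = x := by
  intro arr
  induction arr with
  | nil => simp
  | cons x l ih => simp [ih]

theorem pvMap_fix (arr : List Int) (h : ∀ x ∈ arr, pvStep x = x) : arr.map pvStep = arr :=
  (pvMap_fix_iff arr).mpr h

theorem pvMax_step : ∀ (arr : List Int),
    (∀ x ∈ arr, x % 2 = 0 ∨ 0 ≤ x ∨ x = -1) → (∃ x ∈ arr, pvStep x ≠ x) →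
    pvMax arr = pvMax (arr.map pvStep) + 1 := by
  intro arr
  induction arr with
  | nil => rintro _ ⟨x, hx, _⟩; simp at hx
  | cons x l ih =>
    intro hg hex
    rw [List.map_cons, pvMax_cons, pvMax_cons]
    by_cases hx : pvStep x = x
    · rw [hx, pvN_fix hx]
      rcases hex with ⟨y, hy, hyne⟩
      rcases List.mem_cons.mp hy with rfl | hyl
      · exact absurd hx hyne
      · rw [ih (fun z hz => hg z (by simp [hz])) ⟨y, hyl, hyne⟩]; omega
    · rw [pvN_succ (hg x (by simp)) hx]
      by_cases hl : ∃ y ∈ l, pvStep y ≠ y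
      · rw [ih (fun z hz => hg z (by simp [hz])) hl]; omega
      · push Not at hl
        rw [pvMap_fix l hl, pvMax_zero l hl]; omega

theorem pvAllFix_of_map_eq {arr : List Int} (h : arr.map pvStep = arr) :
    ∀ x ∈ arr, pvStep x = x := (pvMap_fix_iff arr).mp h

theorem pvGood_map {arr : List Int} (h : ∀ x ∈ arr, x % 2 = 0 ∨ 0 ≤ x ∨ x = -1) :
    ∀ y ∈ arr.map pvStep, y % 2 = 0 ∨ 0 ≤ y ∨ y = -1 := by
  intro y hy
  rcases List.mem_map.mp hy with ⟨x, hx, rfl⟩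
  exact pvGood_step (h x hx)

theorem pvLoop : ∀ (f : Nat) (arr : List Int) (c : Int),
    (∀ x ∈ arr, x % 2 = 0 ∨ 0 ≤ x ∨ x = -1) → pvMax arr < f →
    solutionLoop f arr c = c + (pvMax arr : Int) := by
  intro f
  induction f with
  | zero => intro arr c _ h; omega
  | succ f ih =>
    intro arr c hg hf
    simp only [solutionLoop]
    split
    · rename_i heq
      rw [pvMax_zero arr (pvAllFix_of_map_eq heq)]; simp
    · rename_i hne
      have hex : ∃ x ∈ arr, pvStep x ≠ x := by
        by_contra hc
        push Not at hc
        exact hne (pvMap_fix arr hc)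
      have hstep := pvMax_step arr hg hex
      rw [ih (arr.map pvStep) (c + 1) (pvGood_map hg) (by omega)]
      rw [hstep]; push_cast; ring

theorem pvFuel_le : ∀ (arr : List Int) (b a : Nat), b ≤ a →
    arr.foldl (fun b x => max b (pvN x)) b ≤ arr.foldl (fun a x => a + x.natAbs + 51) a := by
  intro arr
  induction arr with
  | nil => intro b a h; simpa using h
  | cons x l ih =>
    intro b a h
    simp only [List.foldl_cons]
    apply ih
    have := pvStepsB_le (x.natAbs + 51) x
    unfold pvN at *
    omega

theorem pvAlt_cast : ∀ (arr : List Int) (b : Nat),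
    arr.foldl (fun best x => max best ((pvStepsB (x.natAbs + 51) x : Nat) : Int)) (b : Int)
      = ((arr.foldl (fun b x => max b (pvN x)) b : Nat) : Int) := by
  intro arr
  induction arr with
  | nil => intro b; simp
  | cons x l ih =>
    intro b
    simp only [List.foldl_cons]
    rw [show max (b : Int) ((pvStepsB (x.natAbs + 51) x : Nat) : Int)
          = ((max b (pvN x) : Nat) : Int) by simp [pvN, Nat.cast_max]]
    exact ih (max b (pvN x))

-- ===== VERDICT (by name: the statement is the Claim_ definition above) =====
theorem solution_spec : Claim_equal_solution := by
  intro arr _ hpre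
  unfold Spec_solution solution solution_alt
  have hfuel : pvMax arr < arr.foldl (fun a x => a + x.natAbs + 51) 0 + 1 := by
    have := pvFuel_le arr 0 0 (le_refl 0)
    unfold pvMax
    omega
  rw [pvLoop _ arr 0 hpre hfuel]
  have := pvAlt_cast arr 0
  simp only [Nat.cast_zero] at this
  rw [this]
  simp [pvMax]
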